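-- pv_equiv track=rewrite | github.com/ROOTXBOT2/CODE | 프로그래머스/0/181855. 문자열 묶기/문자열 묶기.py | solution
-- ===== SOURCE A (Python) =====
-- def solution(strArr):
--     # 각 문자열의 길이를 세어서 딕셔너리에 저장
--     length_count = {}
--     for string in strArr:
--         length = len(string)
--         if length not in length_count:
--             length_count[length] = 0
--         length_count[length] += 1
--
--     # 가장 많이 등장한 문자열 길이를 찾음
--     max_count = 0
--     for count in length_count.values():
--         max_count = max(max_count, count)
--
--     return max_count
-- ===== SOURCE B (Python) =====
-- def solution(strArr):
--     lengths = sorted(len(s) for s in strArr)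
--     best, run, prev = 0, 0, None
--     for l in lengths:
--         run = run + 1 if l == prev else 1
--         prev = l
--         if run > best:
--             best = run
--     return best
-- ===== Notes on version B (the rewrite author's own statement) =====
-- stated objective: alternative
-- what changed: Replaces the frequency dictionary plus a max over its values by sorting the lengths and scanning once for the longest run of equal values.
import Mathlib
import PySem

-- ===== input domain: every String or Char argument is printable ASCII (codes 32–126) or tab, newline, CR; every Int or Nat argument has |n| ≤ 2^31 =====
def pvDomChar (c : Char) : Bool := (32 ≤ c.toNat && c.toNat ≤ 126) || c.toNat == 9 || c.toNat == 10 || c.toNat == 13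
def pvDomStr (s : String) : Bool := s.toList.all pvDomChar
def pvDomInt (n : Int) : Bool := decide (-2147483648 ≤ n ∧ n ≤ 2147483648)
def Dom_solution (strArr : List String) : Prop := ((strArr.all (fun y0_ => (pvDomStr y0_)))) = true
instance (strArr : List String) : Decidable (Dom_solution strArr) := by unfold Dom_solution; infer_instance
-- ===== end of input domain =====

-- B replaces A's frequency dictionary by sorting the lengths and scanning for the longest run; an alternative decomposition, no speed claim.

-- ===== PORT A =====
def solutionStepA (d : PySem.Dict Int Int) (string : String) : PySem.Dict Int Int :=
  let length := PySem.Str.len string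
  let d := if d.contains length then d else d.insert length 0
  d.insert length (d.getD length 0 + 1)

def solution (strArr : List String) : Int :=
  let lengthCount := strArr.foldl solutionStepA PySem.Dict.empty
  lengthCount.values.foldl (fun maxCount count => max maxCount count) 0

-- ===== PORT B =====
def solutionStepB (st : Int × Int × Option Int) (l : Int) : Int × Int × Option Int :=
  let run := if some l = st.2.2 then st.2.1 + 1 else 1
  let prev := some l
  let best := if run > st.1 then run else st.1
  (best, run, prev)

def solution_alt (strArr : List String) : Int :=
  let lengths := PySem.List.sorted (strArr.map (fun s => PySem.Str.len s)) (fun x => x) false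
  (lengths.foldl solutionStepB (0, 0, none)).1

-- ===== PRECONDITION & SPEC =====
def Spec_solution (strArr : List String) (out : Int) : Prop := out = solution_alt strArr
instance (strArr : List String) (out : Int) : Decidable (Spec_solution strArr out) := by unfold Spec_solution; infer_instance

-- ===== CLAIM (what is proved, stated in full; the proofs are below) =====
def Claim_equal_solution : Prop := ∀ (strArr : List String), Dom_solution strArr → Spec_solution strArr (solution strArr)

-- ===== LEMMAS AND PROOFS =====

/-- running max of a projection, started at 0 -/
def supf (f : Int → Int) (xs : List Int) : Int := xs.foldl (fun a v => max a (f v)) 0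

theorem foldl_max_init (f : Int → Int) (t : List Int) : ∀ (a b : Int),
    t.foldl (fun x v => max x (f v)) (max a b) = max a (t.foldl (fun x v => max x (f v)) b) := by
  induction t with
  | nil => intro a b; rfl
  | cons l t ih =>
    intro a b
    simp only [List.foldl_cons, max_assoc]
    exact ih a (max b (f l))

theorem supf_cons (f : Int → Int) (l : Int) (t : List Int) :
    supf f (l :: t) = max (f l) (supf f t) := by
  simp only [supf, List.foldl_cons]
  rw [max_comm (0 : Int) (f l), foldl_max_init]

theorem supf_nonneg (f : Int → Int) (xs : List Int) : 0 ≤ supf f xs :=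
  (PySem.List.le_foldl_max_int xs f 0).1

theorem le_supf (f : Int → Int) (xs : List Int) : ∀ x ∈ xs, f x ≤ supf f xs :=
  (PySem.List.le_foldl_max_int xs f 0).2

theorem supf_le (f : Int → Int) (b : Int) (hb : 0 ≤ b) :
    ∀ (xs : List Int), (∀ x ∈ xs, f x ≤ b) → supf f xs ≤ b := by
  intro xs h
  induction xs with
  | nil => exact hb
  | cons l t ih =>
    rw [supf_cons]
    exact max_le (h l (by simp)) (ih (fun x hx => h x (by simp [hx])))

theorem supf_congr_mem (f g : Int → Int) (xs : List Int) (h : ∀ v ∈ xs, f v = g v) :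
    supf f xs = supf g xs := by
  induction xs with
  | nil => rfl
  | cons l t ih =>
    rw [supf_cons, supf_cons, h l (by simp), ih (fun v hv => h v (by simp [hv]))]

theorem supf_congr_mem_iff (f : Int → Int) (xs ys : List Int) (h : ∀ v, v ∈ xs ↔ v ∈ ys) :
    supf f xs = supf f ys := by
  refine le_antisymm ?_ ?_
  · exact supf_le f _ (supf_nonneg f ys) xs (fun x hx => le_supf f ys x ((h x).mp hx))
  · exact supf_le f _ (supf_nonneg f xs) ys (fun x hx => le_supf f xs x ((h x).mpr hx))

theorem count_cons_int (l v : Int) (t : List Int) :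
    ((l :: t).count v : Int) = (t.count v : Int) + if v = l then 1 else 0 := by
  simp only [List.count_cons]
  split <;> simp_all <;> omega

theorem count_nonneg_int (v : Int) (t : List Int) : (0 : Int) ≤ (t.count v : Int) := Int.natCast_nonneg _

theorem count_pos_int (v : Int) (t : List Int) (h : v ∈ t) : (1 : Int) ≤ (t.count v : Int) := by
  exact_mod_cast List.count_pos_iff.mpr h

theorem count_eq_zero_int (v : Int) (t : List Int) (h : v ∉ t) : ((t.count v : Nat) : Int) = 0 := by
  simp [List.count_eq_zero_of_not_mem h]

/-- the invariant of B's run-length scan on a sorted tail -/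
theorem bloop (ys : List Int) : ∀ (p best run : Int),
    ys.Pairwise (· ≤ ·) → (∀ y ∈ ys, p ≤ y) → 0 ≤ best → 0 ≤ run →
    (ys.foldl solutionStepB (best, run, some p)).1 =
      max best (supf (fun v => (ys.count v : Int) + if v = p then run else 0) ys) := by
  induction ys with
  | nil =>
    intro p best run _ _ hb _
    simp [supf, hb]
  | cons l t ih =>
    intro p best run hpw hge hb hr
    have hlt : ∀ y ∈ t, l ≤ y := (List.pairwise_cons.mp hpw).1
    have htpw : t.Pairwise (· ≤ ·) := (List.pairwise_cons.mp hpw).2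
    have hpl : p ≤ l := hge l (by simp)
    by_cases hlp : l = p
    · -- run continues
      subst hlp
      have hstep : solutionStepB (best, run, some l) l = (max best (run + 1), run + 1, some l) := by
        simp [solutionStepB]
        omega
      rw [List.foldl_cons, hstep,
        ih l (max best (run + 1)) (run + 1) htpw hlt (by omega) (by omega)]
      have hfun : (fun v => ((l :: t).count v : Int) + if v = l then run else 0)
          = fun v => (t.count v : Int) + if v = l then run + 1 else 0 := by
        funext v
        rw [count_cons_int]
        by_cases hv : v = l <;> simp [hv] <;> omega
      rw [hfun, supf_cons, if_pos rfl]
      have hS0 : 0 ≤ supf (fun v => (t.count v : Int) + if v = l then run + 1 else 0) t :=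
        supf_nonneg _ _
      have hc0 : (0 : Int) ≤ (t.count l : Int) := count_nonneg_int _ _
      by_cases hm : l ∈ t
      · have hle := le_supf (fun v => (t.count v : Int) + if v = l then run + 1 else 0) t l hm
        simp at hle
        simp only [max_def]; split_ifs <;> omega
      · rw [count_eq_zero_int l t hm]
        simp only [max_def]; split_ifs <;> omega
    · -- new run
      have hstep : solutionStepB (best, run, some p) l = (max best 1, 1, some l) := by
        simp [solutionStepB, hlp]
        omega
      have hpt : p ∉ t := fun hmem => hlp (le_antisymm (hlt p hmem) hpl)
      rw [List.foldl_cons, hstep, ih l (max best 1) 1 htpw hlt (by omega) (by omega)]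
      have hfun : (fun v => (t.count v : Int) + if v = l then (1 : Int) else 0)
          = fun v => ((l :: t).count v : Int) := by
        funext v
        rw [count_cons_int]
      rw [hfun]
      have hcong : supf (fun v => ((l :: t).count v : Int) + if v = p then run else 0) (l :: t)
          = supf (fun v => ((l :: t).count v : Int)) (l :: t) := by
        apply supf_congr_mem
        intro v hv
        have hvp : v ≠ p := by
          rintro rfl
          rcases List.mem_cons.mp hv with h | h
          · exact hlp h.symm
          · exact hpt h
        simp [hvp]
      rw [hcong, supf_cons]
      have hS0 : 0 ≤ supf (fun v => ((l :: t).count v : Int)) t := supf_nonneg _ _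
      have hc1 : (1 : Int) ≤ ((l :: t).count l : Int) := count_pos_int l (l :: t) (by simp)
      by_cases hm : l ∈ t
      · have hle : ((l :: t).count l : Int) ≤ supf (fun v => ((l :: t).count v : Int)) t :=
          le_supf (fun v => ((l :: t).count v : Int)) t l hm
        simp only [max_def]; split_ifs <;> omega
      · have hone : ((l :: t).count l : Int) = 1 := by
          rw [count_cons_int, count_eq_zero_int l t hm]; simp
        rw [hone]; simp only [max_def]; split_ifs <;> omega

/-- A's dict-building step is Counter's step -/
theorem stepA_eq_modify (d : PySem.Dict Int Int) (s : String) :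
    solutionStepA d s = d.modify (PySem.Str.len s) 0 (· + 1) := by
  by_cases hc : d.contains (PySem.Str.len s) = true
  · simp only [solutionStepA, hc, if_true, PySem.Dict.modify]
  · have hc' : d.contains (PySem.Str.len s) = false := by simpa using hc
    simp only [solutionStepA, hc', Bool.false_eq_true, if_false, PySem.Dict.modify,
      PySem.Dict.getD_insert_self, PySem.Dict.insert_insert_self]
    rw [PySem.Dict.getD_of_not_contains d 0 hc']

/-- A computes the max multiplicity of the length multiset -/
theorem solution_eq_supf (strArr : List String) :
    solution strArr
      = supf (fun v => ((strArr.map PySem.Str.len).count v : Int)) (strArr.map PySem.Str.len) := by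
  have hfold : strArr.foldl solutionStepA PySem.Dict.empty
      = PySem.Dict.counter (strArr.map PySem.Str.len) := by
    rw [PySem.Dict.counter_eq_foldl, List.foldl_map]
    congr 1
    funext d s
    exact stepA_eq_modify d s
  show (strArr.foldl solutionStepA PySem.Dict.empty).values.foldl (fun m c => max m c) 0 = _
  rw [hfold]
  have hvals : (PySem.Dict.counter (strArr.map PySem.Str.len)).values
      = (PySem.Set.ofList (strArr.map PySem.Str.len)).map
          (fun k => ((strArr.map PySem.Str.len).count k : Int)) := by
    show (PySem.Dict.counter (strArr.map PySem.Str.len)).items.map (·.2) = _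
    rw [PySem.Dict.items_counter]
    simp [List.map_map, Function.comp]
  rw [hvals, List.foldl_map]
  exact supf_congr_mem_iff _ _ _ (fun v => PySem.Set.mem_ofList _ v)

-- ===== VERDICT (by name: the statement is the Claim_ definition above) =====
theorem solution_spec : Claim_equal_solution := by
  intro strArr _
  unfold Spec_solution
  rw [solution_eq_supf]
  show _ = ((PySem.List.sorted (strArr.map (fun s => PySem.Str.len s)) (fun x => x) false).foldl
      solutionStepB (0, 0, none)).1
  set xs := strArr.map PySem.Str.len with hxs
  set ys := PySem.List.sorted xs (fun x => x) false with hys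
  have hperm : ys.Perm xs := PySem.List.sorted_perm xs (fun x => x) false
  have hcount : ∀ v, (ys.count v : Int) = (xs.count v : Int) := fun v => by
    exact_mod_cast congrArg Nat.cast (hperm.count_eq v)
  -- move A's side to counts over ys
  have hA : supf (fun v => (xs.count v : Int)) xs = supf (fun v => (ys.count v : Int)) ys := by
    rw [supf_congr_mem_iff (fun v => (xs.count v : Int)) xs ys (fun v => (hperm.mem_iff).symm)]
    exact supf_congr_mem _ _ ys (fun v _ => (hcount v).symm)
  rw [hA]
  have hpw : ys.Pairwise (· ≤ ·) := by
    have := PySem.List.sorted_pairwise xs (fun x => x)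
    simpa [hys] using this
  cases hyse : ys with
  | nil => simp [supf]
  | cons l t =>
    rw [hyse] at hpw
    have hlt : ∀ y ∈ t, l ≤ y := (List.pairwise_cons.mp hpw).1
    have htpw : t.Pairwise (· ≤ ·) := (List.pairwise_cons.mp hpw).2
    have hstep : solutionStepB (0, 0, none) l = (1, 1, some l) := by
      simp [solutionStepB]
    rw [List.foldl_cons, hstep, bloop t l 1 1 htpw hlt (by omega) (by omega)]
    have hfun : (fun v => (t.count v : Int) + if v = l then (1 : Int) else 0)
        = fun v => ((l :: t).count v : Int) := by
      funext v; rw [count_cons_int]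
    rw [hfun, supf_cons]
    have hS0 : 0 ≤ supf (fun v => ((l :: t).count v : Int)) t := supf_nonneg _ _
    have hc1 : (1 : Int) ≤ ((l :: t).count l : Int) := count_pos_int l (l :: t) (by simp)
    by_cases hm : l ∈ t
    · have hle : ((l :: t).count l : Int) ≤ supf (fun v => ((l :: t).count v : Int)) t :=
        le_supf (fun v => ((l :: t).count v : Int)) t l hm
      simp only [max_def]; split_ifs <;> omega
    · have hone : ((l :: t).count l : Int) = 1 := by
        rw [count_cons_int, count_eq_zero_int l t hm]; simp
      rw [hone]
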